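-- pv_equiv track=rewrite | github.com/ashish8796/Codewars | python-kata/cdw_prlm22.py | circularly_sorted
-- ===== SOURCE A (Python) =====
-- def circularly_sorted(arr):
--     if arr == sorted(arr):
--         return True
--     if sorted(arr) == arr[::-1]:
--         return False
--     for i in range(len(arr)-1):
--         if arr[i] > arr[i + 1]:
--             ls1 = arr[i+1:]
--             ls2 = arr[:i+1]
--             break
--     if ls1[0] > ls2[0]:
--         nl = ls2 + ls1
--     else:
--         nl = ls1 + ls2
--     if sorted(nl) == nl:
--         return True
--     else:
--         return False
-- ===== SOURCE B (Python) =====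
-- def circularly_sorted(arr):
--     drops = 0
--     for i in range(len(arr)):
--         if arr[i] > arr[(i + 1) % len(arr)]:
--             drops += 1
--     return drops <= 1
-- ===== Notes on version B (the rewrite author's own statement) =====
-- stated objective: faster
-- what changed: B replaces A's sorted()-comparisons and descent-split-and-resort with a single pass that counts cyclic adjacent descents (including the wrap-around pair) and returns True iff there is at most one.
-- intended difference: On non-increasing lists with exactly one strict descent (e.g. [2,1] or [3,1,1]) A's reverse-sorted early exit returns False, but such a list is a rotation of its sorted version, so B returns True, the intended answer. — e.g. on circularly_sorted([2, 1]): A returns false, B returns true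
import Mathlib
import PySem

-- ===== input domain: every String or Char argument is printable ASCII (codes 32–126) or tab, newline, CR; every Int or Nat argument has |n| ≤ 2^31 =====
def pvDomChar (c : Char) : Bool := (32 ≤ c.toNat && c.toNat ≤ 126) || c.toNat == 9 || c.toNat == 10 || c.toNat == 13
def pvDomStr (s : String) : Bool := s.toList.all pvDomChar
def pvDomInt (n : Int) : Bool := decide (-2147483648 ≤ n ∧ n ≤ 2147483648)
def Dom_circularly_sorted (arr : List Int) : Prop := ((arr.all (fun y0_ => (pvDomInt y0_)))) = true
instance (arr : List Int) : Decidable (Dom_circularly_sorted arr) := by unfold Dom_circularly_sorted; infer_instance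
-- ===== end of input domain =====

-- B replaces A's sort-compare-and-split (O(n log n)) by a single O(n) pass counting cyclic descents;
-- A and B intentionally differ on non-increasing lists with exactly one strict descent (see D_ below).


-- ===== PORT A =====
-- A's 'for i in range(len(arr)-1): … break' loop: acc is arr[:i]; at the first i with arr[i] > arr[i+1]
-- it yields (ls1, ls2) = (arr[i+1:], arr[:i+1]); none = the loop ran out (Python would leave ls1/ls2 unbound)
def pvFindSplit (acc : List Int) : List Int → Option (List Int × List Int)
  | a :: b :: t => if b < a then some (b :: t, acc ++ [a]) else pvFindSplit (acc ++ [a]) (b :: t)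
  | _ => none

def circularly_sorted (arr : List Int) : Bool :=
  let s := PySem.List.sorted arr (fun x => x) false
  if arr = s then true
  else if PySem.List.slice? arr none none (-1) = some s then false
  else
    match pvFindSplit [] arr with
    | some (h1 :: t1, h2 :: t2) =>
        let nl := if h2 < h1 then (h2 :: t2) ++ (h1 :: t1) else (h1 :: t1) ++ (h2 :: t2)
        decide (PySem.List.sorted nl (fun x => x) false = nl)
    | _ => false  -- unreachable: arr ≠ sorted(arr) guarantees the loop breaks with nonempty ls1, ls2
                  -- (Python would raise UnboundLocalError here, but this branch is never taken)

-- ===== PORT B =====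
def circularly_sorted_alt (arr : List Int) : Bool :=
  match PySem.List.pyGet? arr (-1) with
  | none => true                     -- 'if not arr: return True'
  | some lastElem =>                 -- 'prev = arr[-1]' then one pass counting cyclic descents
      let st := arr.foldl (fun (s : Int × Int) x => (if s.2 > x then s.1 + 1 else s.1, x)) ((0 : Int), lastElem)
      decide (st.1 ≤ 1)

-- ===== PRECONDITION & SPEC =====
-- A returns False on every non-increasing list with exactly one strict descent (e.g. [2,1], [3,1,1]) because its
-- reverse-sorted early exit fires first, although such a list IS a rotation of its sorted version; B returns True,
-- the intended answer for a circular-sortedness check.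
def D_circularly_sorted (arr : List Int) : Prop :=
  arr.IsChain (fun a b => b ≤ a) ∧ (arr.zip arr.tail).countP (fun p => decide (p.2 < p.1)) = 1
instance (arr : List Int) : Decidable (D_circularly_sorted arr) := by unfold D_circularly_sorted; infer_instance

def Spec_circularly_sorted (arr : List Int) (out : Bool) : Prop :=
  ¬ D_circularly_sorted arr → out = circularly_sorted_alt arr
instance (arr : List Int) (out : Bool) : Decidable (Spec_circularly_sorted arr out) := by unfold Spec_circularly_sorted; infer_instance

def pvDiffWitness_circularly_sorted : List Int := [2, 1]
def pvDiffWitnessOut_circularly_sorted : Bool × Bool := (false, true)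

-- ===== CLAIM (what is proved, stated in full; the proofs are below) =====
def Claim_unchanged_circularly_sorted : Prop := ∀ (arr : List Int), Dom_circularly_sorted arr → Spec_circularly_sorted arr (circularly_sorted arr)
def Claim_changed_circularly_sorted : Prop := Dom_circularly_sorted (pvDiffWitness_circularly_sorted) ∧ D_circularly_sorted (pvDiffWitness_circularly_sorted) ∧ circularly_sorted (pvDiffWitness_circularly_sorted) = pvDiffWitnessOut_circularly_sorted.1 ∧ circularly_sorted_alt (pvDiffWitness_circularly_sorted) = pvDiffWitnessOut_circularly_sorted.2 ∧ pvDiffWitnessOut_circularly_sorted.1 ≠ pvDiffWitnessOut_circularly_sorted.2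
def Claim_exact_circularly_sorted : Prop := ∀ (arr : List Int), Dom_circularly_sorted arr → D_circularly_sorted arr → circularly_sorted arr ≠ circularly_sorted_alt arr

-- ===== LEMMAS AND PROOFS =====

-- proof-side measure: number of strict adjacent descents, in recursive form
def pvDescents : List Int → Nat
  | a :: b :: t => (if b < a then 1 else 0) + pvDescents (b :: t)
  | _ => 0

-- D_'s descent count and the recursive measure agree
theorem pv_countP_eq_descents (l : List Int) :
    (l.zip l.tail).countP (fun p => decide (p.2 < p.1)) = pvDescents l := by
  induction l with
  | nil => rfl
  | cons a t ih =>
    cases t with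
    | nil => rfl
    | cons b t' =>
      simp only [List.tail_cons, List.zip_cons_cons, List.countP_cons, pvDescents] at ih ⊢
      rw [← ih]
      by_cases h : b < a
      · simp [h]; omega
      · simp [h]

-- sorted(arr) == arr  ↔  arr is non-decreasing
theorem pv_sorted_eq_iff (xs : List Int) :
    PySem.List.sorted xs (fun x => x) false = xs ↔ xs.IsChain (· ≤ ·) := by
  constructor
  · intro h
    have hp := PySem.List.sorted_pairwise xs (fun x => x)
    rw [h] at hp
    exact List.isChain_iff_pairwise.mpr (by simpa using hp)
  · intro h
    have hp := List.isChain_iff_pairwise.mp h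
    exact PySem.List.sorted_eq_self_of_pairwise xs (fun x => x) (by simpa using hp)

-- sorted(arr) == arr[::-1]  ↔  arr is non-increasing
theorem pv_sorted_eq_rev_iff (xs : List Int) :
    PySem.List.sorted xs (fun x => x) false = xs.reverse ↔ xs.IsChain (fun a b => b ≤ a) := by
  constructor
  · intro h
    have hp := PySem.List.sorted_pairwise xs (fun x => x)
    rw [h] at hp
    have : xs.reverse.IsChain (· ≤ ·) := List.isChain_iff_pairwise.mpr (by simpa using hp)
    simpa using List.isChain_reverse.mp this
  · intro h
    refine PySem.List.sorted_id_eq_of_perm_of_pairwise xs xs.reverse (List.reverse_perm xs) ?_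
    rw [← List.isChain_iff_pairwise]
    exact List.isChain_reverse.mpr (by simpa using h)

theorem pv_descents_zero_iff (xs : List Int) : pvDescents xs = 0 ↔ xs.IsChain (· ≤ ·) := by
  induction xs with
  | nil => simp [pvDescents]
  | cons a t ih =>
    cases t with
    | nil => simp [pvDescents]
    | cons b t' =>
      rw [List.isChain_cons_cons, ← ih]
      simp only [pvDescents]
      split_ifs with h <;> omega

theorem pv_descents_append (pre : List Int) (y : Int) (ys : List Int) :
    pvDescents (pre ++ y :: ys) = pvDescents (pre ++ [y]) + pvDescents (y :: ys) := by
  induction pre with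
  | nil => simp [pvDescents]
  | cons x pre' ih =>
    cases pre' with
    | nil => cases ys <;> simp [pvDescents]
    | cons x' pre'' =>
      simp only [List.cons_append, pvDescents] at ih ⊢
      omega

-- the loop of A always breaks on a non-sorted input, and where it breaks
theorem pv_findSplit_spec (xs : List Int) : ∀ acc : List Int, ¬ xs.IsChain (· ≤ ·) →
    ∃ pre a b suf, xs = pre ++ a :: b :: suf ∧ (pre ++ [a]).IsChain (· ≤ ·) ∧ b < a ∧
      pvFindSplit acc xs = some (b :: suf, acc ++ (pre ++ [a])) := by
  induction xs with
  | nil => intro acc h; exact absurd (by simp) h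
  | cons a t ih =>
    intro acc h
    cases t with
    | nil => exact absurd (by simp) h
    | cons b t' =>
      by_cases hba : b < a
      · exact ⟨[], a, b, t', by simp, by simp, hba, by simp [pvFindSplit, hba]⟩
      · have hab : a ≤ b := by omega
        have hnt : ¬ (b :: t').IsChain (· ≤ ·) := by
          intro hc; exact h (List.isChain_cons_cons.mpr ⟨hab, hc⟩)
        obtain ⟨pre', a', b', suf', heq, hchain, hlt, hfs⟩ := ih (acc ++ [a]) hnt
        refine ⟨a :: pre', a', b', suf', by simp [heq], ?_, hlt, ?_⟩
        · -- a ≤ head of (pre' ++ [a']) = b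
          have hhead : (pre' ++ [a']).head? = some b := by
            cases pre' with
            | nil => simpa using congrArg List.head? heq.symm
            | cons p ps => simpa using congrArg List.head? heq.symm
          rw [List.cons_append]
          cases hp : pre' ++ [a'] with
          | nil => simp at hp
          | cons z zs =>
            rw [hp] at hhead hchain
            simp only [List.head?_cons, Option.some.injEq] at hhead
            exact List.isChain_cons_cons.mpr ⟨hhead ▸ hab, hchain⟩
        · simp only [pvFindSplit, if_neg hba, hfs]
          simp [List.append_assoc]

theorem pv_chain_le_last {x : Int} {t : List Int} (h : (x :: t).IsChain (· ≤ ·)) :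
    x ≤ (x :: t).getLast (by simp) := by
  have hp := List.isChain_iff_pairwise.mp h
  have h1 := List.getLast_mem (l := x :: t) (by simp)
  rcases List.mem_cons.mp h1 with h2 | h2
  · omega
  · exact (List.pairwise_cons.mp hp).1 _ h2

theorem pv_chain_ge_last {x : Int} {t : List Int} (h : (x :: t).IsChain (fun a b => b ≤ a)) :
    (x :: t).getLast (by simp) ≤ x := by
  have hp := List.isChain_iff_pairwise.mp h
  have h1 := List.getLast_mem (l := x :: t) (by simp)
  rcases List.mem_cons.mp h1 with h2 | h2
  · omega
  · exact (List.pairwise_cons.mp hp).1 _ h2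

theorem pv_getLast_congr (l1 l2 : List Int) (h : l1 = l2) (h1 : l1 ≠ []) :
    l1.getLast h1 = l2.getLast (h ▸ h1) := by subst h; rfl

theorem pv_alt_fold (t : List Int) : ∀ (x : Int) (c p : Int),
    (x :: t).foldl (fun (s : Int × Int) x => (if s.2 > x then s.1 + 1 else s.1, x)) (c, p)
      = (c + (if x < p then 1 else 0) + (pvDescents (x :: t) : Int), (x :: t).getLast (by simp)) := by
  induction t with
  | nil =>
    intro x c p
    simp only [List.foldl_cons, List.foldl_nil, List.getLast_singleton]
    have hz : pvDescents [x] = 0 := rfl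
    rw [hz]
    split_ifs with h
    · simp
    · simp
  | cons y t' ih =>
    intro x c p
    have : (x :: y :: t').foldl (fun (s : Int × Int) x => (if s.2 > x then s.1 + 1 else s.1, x)) (c, p)
        = (y :: t').foldl (fun (s : Int × Int) x => (if s.2 > x then s.1 + 1 else s.1, x))
            ((if x < p then c + 1 else c), x) := by
      rfl
    rw [this, ih]
    have hlast : (y :: t').getLast (by simp) = (x :: y :: t').getLast (by simp) :=
      (List.getLast_cons (by simp)).symm
    rw [hlast]
    simp only [pvDescents, Prod.mk.injEq, and_true]
    split_ifs <;> push_cast <;> omega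

-- B's value on a non-empty list, in terms of wrap-around descent + adjacent descents
theorem pv_alt_char (x : Int) (t : List Int) :
    circularly_sorted_alt (x :: t)
      = decide ((if x < (x :: t).getLast (by simp) then 1 else 0) + (pvDescents (x :: t) : Int) ≤ 1) := by
  have hget : PySem.List.pyGet? (x :: t) (-1) = some ((x :: t).getLast (by simp)) := by
    simp [PySem.List.pyGet?, PySem.List.pyIdx?, List.getLast_eq_getElem]
    rfl
  simp only [circularly_sorted_alt, hget, pv_alt_fold]
  norm_num

-- the core equivalence, outside D_
theorem pv_main (arr : List Int) (hD : ¬ D_circularly_sorted arr) :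
    circularly_sorted arr = circularly_sorted_alt arr := by
  by_cases hs : arr.IsChain (· ≤ ·)
  · -- both True
    have hA : circularly_sorted arr = true := by
      simp [circularly_sorted, (pv_sorted_eq_iff arr).mpr hs]
    rw [hA]
    cases arr with
    | nil => rfl
    | cons x t =>
      rw [pv_alt_char]
      have h0 : pvDescents (x :: t) = 0 := (pv_descents_zero_iff _).mpr hs
      rw [h0]
      split_ifs <;> simp
  · have hne : arr ≠ PySem.List.sorted arr (fun x => x) false := by
      intro h; exact hs ((pv_sorted_eq_iff arr).mp h.symm)
    obtain ⟨x, t, rfl⟩ : ∃ x t, arr = x :: t := by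
      cases arr with
      | nil => exact absurd (by simp) hs
      | cons x t => exact ⟨x, t, rfl⟩
    have hd0 : pvDescents (x :: t) ≠ 0 := fun h => hs ((pv_descents_zero_iff _).mp h)
    by_cases hr : (x :: t).IsChain (fun a b => b ≤ a)
    · -- A takes the reverse-sorted exit (False); outside D_ there are ≥ 2 descents, so B is False too
      have hrev : PySem.List.sorted (x :: t) (fun x => x) false = (x :: t).reverse :=
        (pv_sorted_eq_rev_iff _).mpr hr
      have hA : circularly_sorted (x :: t) = false := by
        simp only [circularly_sorted, if_neg (fun h => hne h)]
        rw [PySem.List.slice?_none_none_neg_one, hrev]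
        simp
      have hd1 : pvDescents (x :: t) ≠ 1 := fun h => hD ⟨hr, by rw [pv_countP_eq_descents]; exact h⟩
      rw [hA, pv_alt_char]
      have : ¬ ((if x < (x :: t).getLast (by simp) then 1 else 0) + (pvDescents (x :: t) : Int) ≤ 1) := by
        split_ifs <;> omega
      simp [this]
    · -- A reaches the split; both sides reduce to: tail chain sorted ∧ last ≤ head
      have hnrev : ¬ (PySem.List.slice? (x :: t) none none (-1)
          = some (PySem.List.sorted (x :: t) (fun x => x) false)) := by
        rw [PySem.List.slice?_none_none_neg_one]
        intro h
        exact hr ((pv_sorted_eq_rev_iff _).mp (Option.some.injEq _ _ ▸ (by simpa using h.symm)))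
      obtain ⟨pre, a, b, suf, heq, hchain, hba, hfs⟩ := pv_findSplit_spec (x :: t) [] hs
      -- head of arr is the head of pre ++ [a]
      have hx : (pre ++ [a]).head? = some x := by
        have := congrArg List.head? heq
        cases pre with
        | nil => simpa using this.symm
        | cons p ps => simpa using this.symm
      have he : x :: t = (pre ++ [a]) ++ b :: suf := by simp [heq]
      have h1g : ((pre ++ [a]) ++ b :: suf).getLast (by simp) = (b :: suf).getLast (by simp) := by
        rw [List.getLast_append_of_ne_nil (by simp)]
      have hlast : (x :: t).getLast (by simp) = (b :: suf).getLast (by simp) :=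
        (pv_getLast_congr _ _ he (by simp)).trans h1g
      have hdesc : (pvDescents (x :: t) : Int) = 1 + pvDescents (b :: suf) := by
        rw [heq, show pre ++ a :: b :: suf = pre ++ a :: (b :: suf) from rfl,
          pv_descents_append pre a (b :: suf)]
        have h0 : pvDescents (pre ++ [a]) = 0 := (pv_descents_zero_iff _).mpr hchain
        have : pvDescents (a :: b :: suf) = 1 + pvDescents (b :: suf) := by
          simp only [pvDescents, if_pos hba]
        push_cast [h0, this]; ring
      -- the common condition
      have hBiff : circularly_sorted_alt (x :: t)
          = decide ((b :: suf).IsChain (· ≤ ·) ∧ (b :: suf).getLast (by simp) ≤ x) := by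
        rw [pv_alt_char, hlast]
        rcases eq_or_ne (pvDescents (b :: suf)) 0 with hz | hz
        · have hc := (pv_descents_zero_iff _).mp hz
          rw [hdesc, hz]
          split_ifs with h1
          · simp only [decide_eq_decide]; constructor
            · omega
            · rintro ⟨-, h2⟩; omega
          · simp only [decide_eq_decide]; constructor
            · intro _; exact ⟨hc, by omega⟩
            · intro _; omega
        · have hnc : ¬ (b :: suf).IsChain (· ≤ ·) := fun h => hz ((pv_descents_zero_iff _).mpr h)
          rw [hdesc]
          have : ¬ ((if x < (b :: suf).getLast (by simp) then 1 else 0) + (1 + (pvDescents (b :: suf) : Int)) ≤ 1) := by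
            split_ifs <;> omega
          simp [this, hnc]
      -- A's match
      cases hl2 : pre ++ [a] with
      | nil => simp at hl2
      | cons h2 t2 =>
        have hx2 : h2 = x := by rw [hl2] at hx; simpa using hx
        have hA : circularly_sorted (x :: t)
            = (if h2 < b then decide (PySem.List.sorted ((h2 :: t2) ++ (b :: suf)) (fun x => x) false = (h2 :: t2) ++ (b :: suf))
               else decide (PySem.List.sorted ((b :: suf) ++ (h2 :: t2)) (fun x => x) false = (b :: suf) ++ (h2 :: t2))) := by
          simp only [circularly_sorted, if_neg (fun h => hne h), if_neg hnrev, hfs, hl2]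
          by_cases h : h2 < b
          · simp [h]
          · simp [h]
        rw [hA, hBiff]
        by_cases hcb : h2 < b
        · -- nl = ls2 ++ ls1 = arr itself, not sorted: A False; and B False since a true tail chain forces a wrap descent
          rw [if_pos hcb]
          have harr : (h2 :: t2) ++ (b :: suf) = x :: t := by rw [← hl2]; simp [heq]
          rw [harr]
          have hAf : decide (PySem.List.sorted (x :: t) (fun x => x) false = x :: t) = false := by
            simpa using fun h => hne h.symm
          rw [hAf]
          have : ¬ ((b :: suf).IsChain (· ≤ ·) ∧ (b :: suf).getLast (by simp) ≤ x) := by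
            rintro ⟨hc, hle⟩
            have := pv_chain_le_last hc
            omega
          simp [this]
        · rw [if_neg hcb]
          simp only [decide_eq_decide]
          rw [pv_sorted_eq_iff, List.isChain_append]
          constructor
          · rintro ⟨hc1, -, hj⟩
            refine ⟨hc1, ?_⟩
            have hgl : (b :: suf).getLast? = some ((b :: suf).getLast (by simp)) :=
              List.getLast?_eq_some_getLast (by simp)
            have := hj _ hgl x (by simp [hx2])
            exact this
          · rintro ⟨hc1, hle⟩
            refine ⟨hc1, hl2 ▸ hchain, ?_⟩
            intro u hu v hv
            have h1 : (b :: suf).getLast? = some u := hu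
            rw [List.getLast?_eq_some_getLast (by simp)] at h1
            have h2v : h2 = v := by simpa using hv
            have h1' : u = (b :: suf).getLast (by simp) := (Option.some.inj h1).symm
            rw [h1', ← h2v, hx2]; exact hle

-- ===== VERDICT (by name: the statement is the Claim_ definition above) =====
theorem circularly_sorted_spec : Claim_unchanged_circularly_sorted := by
  intro arr _ hD
  exact pv_main arr hD

theorem circularly_sorted_changed : Claim_changed_circularly_sorted := by
  unfold Claim_changed_circularly_sorted; decide

theorem circularly_sorted_tight : Claim_exact_circularly_sorted := by
  intro arr _ hD
  obtain ⟨hr, hd1'⟩ := hD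
  rw [pv_countP_eq_descents] at hd1'
  obtain ⟨x, t, rfl⟩ : ∃ x t, arr = x :: t := by
    cases arr with
    | nil => simp [pvDescents] at hd1'
    | cons x t => exact ⟨x, t, rfl⟩
  have hs : ¬ (x :: t).IsChain (· ≤ ·) := by
    intro h
    rw [← pv_descents_zero_iff] at h
    omega
  have hA : circularly_sorted (x :: t) = false := by
    simp only [circularly_sorted,
      if_neg (fun h => hs ((pv_sorted_eq_iff _).mp (h : (x:: t) = _).symm))]
    rw [PySem.List.slice?_none_none_neg_one, (pv_sorted_eq_rev_iff _).mpr hr]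
    simp
  have hB : circularly_sorted_alt (x :: t) = true := by
    rw [pv_alt_char, hd1']
    have := pv_chain_ge_last hr
    have : ¬ (x < (x :: t).getLast (by simp)) := by omega
    simp [this]
  rw [hA, hB]
  simp
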